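-- pv_equiv track=rewrite | github.com/Leftfish/Advent-of-Code-2022 | 25/d25.py | base10_to_SNAFU
-- ===== SOURCE A (Python) =====
-- CONVERSION_TABLE = {'3': '=', '4': '-', '5': '0', '6': '1', '7': '2'}
--
-- def base10_to_SNAFU(num):
--     def to_base_5(n):
--         s = ""
--         while n:
--             s = str(n % 5) + s
--             n //= 5
--         return s
--     SNAFU_digits = list(to_base_5(num)[::-1])
--     i, j = 0, len(SNAFU_digits)
--     while i < j:
--         if SNAFU_digits[i] in CONVERSION_TABLE:
--             SNAFU_digits[i] = CONVERSION_TABLE[SNAFU_digits[i]]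
--             if i < len(SNAFU_digits) - 1:
--                 SNAFU_digits[i+1] = str(int(SNAFU_digits[i+1]) + 1)
--             else:
--                 SNAFU_digits.append(str(1))
--                 j += 1
--         i += 1
--     return ''.join(SNAFU_digits)[::-1]
-- ===== SOURCE B (Python) =====
-- def base10_to_SNAFU(num):
--     digits = []
--     while num:
--         d = num % 5
--         if d <= 2:
--             digits.append(str(d))
--             num //= 5
--         else:
--             digits.append('=' if d == 3 else '-')
--             num = num // 5 + 1
--     return ''.join(reversed(digits))
-- ===== Notes on version B (the rewrite author's own statement) =====
-- stated objective: simpler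
-- what changed: B replaces A's two-pass build-base-5-string-then-carry-fixup-over-a-mutable-indexed-list with a single balanced-base-5 loop that folds the carry directly into the quotient (num = num // 5 + 1), emitting final SNAFU digits immediately.
import Mathlib
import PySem

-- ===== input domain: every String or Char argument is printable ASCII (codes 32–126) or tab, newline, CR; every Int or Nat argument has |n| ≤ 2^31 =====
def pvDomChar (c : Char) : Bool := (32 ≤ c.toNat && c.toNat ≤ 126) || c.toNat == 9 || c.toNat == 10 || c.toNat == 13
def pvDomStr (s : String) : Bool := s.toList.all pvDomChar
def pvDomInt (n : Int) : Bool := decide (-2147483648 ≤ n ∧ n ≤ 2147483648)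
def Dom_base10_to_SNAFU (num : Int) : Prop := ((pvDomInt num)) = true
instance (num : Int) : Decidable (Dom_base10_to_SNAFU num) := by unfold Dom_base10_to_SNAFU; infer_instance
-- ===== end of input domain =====

-- B replaces A's base-5-string pass plus carry-fixup pass over an index-mutated list by a
-- single balanced-base-5 loop folding the carry into the quotient; equally fast, simpler.

-- ===== PORT A =====

-- CONVERSION_TABLE (keys/values are the 1-character strings of the Python dict, held as Char)
def pvConvTable : PySem.Dict Char Char :=
  PySem.Dict.ofList [('3', '='), ('4', '-'), ('5', '0'), ('6', '1'), ('7', '2')]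

-- 'while n: s = str(n % 5) + s; n //= 5' — the fuel argument only makes the loop total
-- (the Python loop diverges for n < 0; those inputs are outside Pre_).
-- str(n % 5) is PySem.Int.toChars of the floor-mod, prepended to the accumulated chars.
def pvToBase5 : Nat → Int → List Char → List Char
  | 0, _, s => s
  | fuel + 1, n, s =>
    if n ≠ 0 then pvToBase5 fuel (PySem.Int.floordiv n 5) (PySem.Int.toChars (PySem.Int.mod n 5) ++ s)
    else s

-- the 'while i < j' carry-fixup loop over the mutable list, fuel-guarded for totality;
-- indexing/assignment via pyGetD/pySetD (indices are provably in range whenever the loop runs).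
-- str(int(d) + 1) is Char.ofNat (d.toNat + 1): exact, since d is always a digit '0'..'7' here.
def pvFixLoop : Nat → List Char → Int → Int → List Char
  | 0, ds, _, _ => ds
  | fuel + 1, ds, i, j =>
    if i < j then
      let c := PySem.List.pyGetD ds i ' '
      if pvConvTable.contains c then
        let ds1 := PySem.List.pySetD ds i ((pvConvTable.get? c).getD c)
        if i < (ds1.length : Int) - 1 then
          let d := PySem.List.pyGetD ds1 (i + 1) ' '
          pvFixLoop fuel (PySem.List.pySetD ds1 (i + 1) (Char.ofNat (d.toNat + 1))) (i + 1) j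
        else
          pvFixLoop fuel (ds1 ++ ['1']) (i + 1) (j + 1)
      else pvFixLoop fuel ds (i + 1) j
    else ds

def base10_to_SNAFU (num : Int) : String :=
  let sd : List Char := (pvToBase5 (num.natAbs + 1) num []).reverse  -- list(to_base_5(num)[::-1])
  let out := pvFixLoop (2 * sd.length + 2) sd 0 (sd.length : Int)
  String.ofList out.reverse                                              -- ''.join(...)[::-1]

-- ===== PORT B =====

-- 'while num:' of Source B, fuel-guarded for totality (one iteration strictly shrinks |num|);
-- digits.append(...) is acc ++ [·], str(d) for 0 ≤ d ≤ 2 is PySem.Int.toChars d.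
def pvSnafuLoop : Nat → Int → List Char → List Char
  | 0, _, acc => acc
  | fuel + 1, n, acc =>
    if n ≠ 0 then
      let d := PySem.Int.mod n 5
      if d ≤ 2 then pvSnafuLoop fuel (PySem.Int.floordiv n 5) (acc ++ PySem.Int.toChars d)
      else pvSnafuLoop fuel (PySem.Int.floordiv n 5 + 1) (acc ++ [if d == 3 then '=' else '-'])
    else acc

def base10_to_SNAFU_alt (num : Int) : String :=
  String.ofList (pvSnafuLoop (num.natAbs + 1) num []).reverse            -- ''.join(reversed(digits))

-- ===== PRECONDITION & SPEC =====

-- A's inner 'while n: ... n //= 5' never terminates for negative num (n //= 5 stalls at -1),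
-- so A returns only on 0 ≤ num; Pre_ excludes exactly the diverging inputs.
def Pre_base10_to_SNAFU (num : Int) : Prop := 0 ≤ num
instance (num : Int) : Decidable (Pre_base10_to_SNAFU num) := by unfold Pre_base10_to_SNAFU; infer_instance

def pvWitness_base10_to_SNAFU : Int := 2022

def Spec_base10_to_SNAFU (num : Int) (out : String) : Prop := out = base10_to_SNAFU_alt num
instance (num : Int) (out : String) : Decidable (Spec_base10_to_SNAFU num out) := by unfold Spec_base10_to_SNAFU; infer_instance

-- ===== CLAIM (what is proved, stated in full; the proofs are below) =====
def Claim_equal_base10_to_SNAFU : Prop :=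
  ∀ (num : Int), Dom_base10_to_SNAFU num → Pre_base10_to_SNAFU num →
    Spec_base10_to_SNAFU num (base10_to_SNAFU num)

-- ===== LEMMAS AND PROOFS =====

-- digit characters '0'..'5' (all that ever occurs in A's list)
def pvDChar : Nat → Char
  | 0 => '0' | 1 => '1' | 2 => '2' | 3 => '3' | 4 => '4' | 5 => '5' | _ => '*'

-- little-endian base-5 digits of m
def pvBase5 (m : Nat) : List Char :=
  if h : m = 0 then [] else pvDChar (m % 5) :: pvBase5 (m / 5)
  decreasing_by exact Nat.div_lt_self (Nat.pos_of_ne_zero h) (by norm_num)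

lemma pvDiv5_carry_lt (m : Nat) (h : 3 ≤ m % 5) : m / 5 + 1 < m := by
  have h2 : m / 5 < m - 1 := (Nat.div_lt_iff_lt_mul (by norm_num)).2 (by omega)
  omega

-- little-endian SNAFU digits of m (the value B's loop accumulates)
def pvBDig (m : Nat) : List Char :=
  if h : m = 0 then []
  else if h2 : m % 5 ≤ 2 then pvDChar (m % 5) :: pvBDig (m / 5)
  else (if m % 5 = 3 then '=' else '-') :: pvBDig (m / 5 + 1)
  termination_by m
  decreasing_by
  · exact Nat.div_lt_self (Nat.pos_of_ne_zero h) (by norm_num)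
  · exact pvDiv5_carry_lt m (by omega)

-- the (possibly incremented) lowest digit: 'carry true' applies A's str(int(d)+1) in place
def pvCarry : Bool → List Char → List Char
  | false, xs => xs
  | true, [] => ['1']
  | true, c :: t => Char.ofNat (c.toNat + 1) :: t

lemma pvBDig_nil_iff (m : Nat) : pvBDig m = [] ↔ m = 0 := by
  constructor
  · intro h; by_contra hm
    rw [pvBDig] at h
    split_ifs at h
  · intro h; subst h; rw [pvBDig]; simp

lemma pvToChars_small (k : Nat) (h : k < 5) : PySem.Int.toChars (k : Int) = [pvDChar k] := by
  interval_cases k <;> decide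

lemma pvMod5_cast (m : Nat) : PySem.Int.mod (m : Int) 5 = ((m % 5 : Nat) : Int) := by
  rw [PySem.Int.mod_eq_emod_of_pos (by norm_num : (0:Int) < 5)]; omega

lemma pvDiv5_cast (m : Nat) : PySem.Int.floordiv (m : Int) 5 = ((m / 5 : Nat) : Int) := by
  rw [PySem.Int.floordiv_eq_ediv_of_pos (by norm_num : (0:Int) < 5)]; omega

-- B's loop computes pvBDig
lemma pvSnafuLoop_eq (fuel m : Nat) (acc : List Char) (hf : m < fuel) :
    pvSnafuLoop fuel (m : Int) acc = acc ++ pvBDig m := by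
  induction fuel generalizing m acc with
  | zero => omega
  | succ fuel ih =>
    by_cases hm : m = 0
    · subst hm; simp [pvSnafuLoop, pvBDig]
    · rw [pvSnafuLoop]
      simp only [pvMod5_cast, pvDiv5_cast]
      have hne : (m : Int) ≠ 0 := by exact_mod_cast hm
      rw [if_pos hne]
      by_cases h2 : m % 5 ≤ 2
      · have : ((m % 5 : Nat) : Int) ≤ 2 := by exact_mod_cast h2
        rw [if_pos this, pvToChars_small _ (Nat.mod_lt m (by norm_num)),
          ih _ _ (by omega : m / 5 < fuel)]
        conv_rhs => rw [pvBDig, dif_neg hm, dif_pos h2]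
        simp
      · have : ¬ ((m % 5 : Nat) : Int) ≤ 2 := by exact_mod_cast h2
        rw [if_neg this]
        have hcast : ((m / 5 : Nat) : Int) + 1 = ((m / 5 + 1 : Nat) : Int) := by push_cast; ring
        rw [hcast, ih _ _ (by have := pvDiv5_carry_lt m (by omega); omega)]
        conv_rhs => rw [pvBDig, dif_neg hm, dif_neg h2]
        have h5 : m % 5 < 5 := Nat.mod_lt m (by norm_num)
        have heq : (if ((m % 5 : Nat) : Int) == 3 then '=' else '-') = (if m % 5 = 3 then '=' else '-') := by
          by_cases h3 : m % 5 = 3 <;> simp [h3]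
          omega
        rw [heq]; simp

-- A's to_base_5 computes the reversed base-5 digit list
lemma pvToBase5_eq (fuel m : Nat) (acc : List Char) (hf : m < fuel) :
    pvToBase5 fuel (m : Int) acc = (pvBase5 m).reverse ++ acc := by
  induction fuel generalizing m acc with
  | zero => omega
  | succ fuel ih =>
    by_cases hm : m = 0
    · subst hm; rw [pvToBase5, pvBase5]; simp
    · rw [pvToBase5]
      have hne : (m : Int) ≠ 0 := by exact_mod_cast hm
      rw [if_pos hne]
      simp only [pvMod5_cast, pvDiv5_cast]
      rw [pvToChars_small _ (Nat.mod_lt m (by norm_num)),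
        ih _ _ (by have := Nat.div_lt_self (Nat.pos_of_ne_zero hm) (by norm_num : 1 < 5); omega)]
      conv_rhs => rw [pvBase5, dif_neg hm]
      simp

lemma pvBase5_nil_iff (m : Nat) : pvBase5 m = [] ↔ m = 0 := by
  constructor
  · intro h; by_contra hm; rw [pvBase5, dif_neg hm] at h; simp at h
  · intro h; subst h; rw [pvBase5]; simp

-- length bound: B emits at most one digit more than the raw base-5 string
lemma pvBDig_len (m : Nat) :
    (pvBDig m).length ≤ (pvBase5 m).length + 1 ∧
    (pvBDig (m + 1)).length ≤ (pvBase5 m).length + 1 := by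
  induction m using Nat.strong_induction_on with
  | _ m ih =>
    by_cases hm : m = 0
    · subst hm
      refine ⟨by rw [pvBDig]; simp, ?_⟩
      rw [pvBDig]; norm_num
      rw [pvBDig]; simp
    · have hdm : m / 5 < m := Nat.div_lt_self (Nat.pos_of_ne_zero hm) (by norm_num)
      obtain ⟨ih1, ih2⟩ := ih (m / 5) hdm
      have hB : (pvBase5 m).length = (pvBase5 (m / 5)).length + 1 := by
        conv_lhs => rw [pvBase5, dif_neg hm]
        simp
      constructor
      · conv_lhs => rw [pvBDig, dif_neg hm]
        by_cases h2 : m % 5 ≤ 2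
        · rw [dif_pos h2]; simp only [List.length_cons]; omega
        · rw [dif_neg h2]; simp only [List.length_cons]; omega
      · have hm1 : ¬ (m + 1 = 0) := by omega
        conv_lhs => rw [pvBDig, dif_neg hm1]
        by_cases h4 : m % 5 = 4
        · have e2 : (m + 1) / 5 = m / 5 + 1 := by omega
          rw [dif_pos (by omega : (m + 1) % 5 ≤ 2), e2]
          simp only [List.length_cons]; omega
        · have e2 : (m + 1) / 5 = m / 5 := by omega
          by_cases h1 : m % 5 ≤ 1
          · rw [dif_pos (by omega : (m + 1) % 5 ≤ 2), e2]
            simp only [List.length_cons]; omega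
          · rw [dif_neg (by omega : ¬ (m + 1) % 5 ≤ 2), e2]
            simp only [List.length_cons]; omega

-- the (possibly carry-incremented) head digit of A's working list
lemma pvCarry_cons (m : Nat) (e : Bool) (h : ¬ (m = 0 ∧ e = false)) :
    pvCarry e (pvBase5 m) = pvDChar (m % 5 + (if e then 1 else 0)) :: pvBase5 (m / 5) := by
  cases e with
  | false =>
    have hm : ¬ m = 0 := by simpa using h
    rw [pvBase5, dif_neg hm]; simp [pvCarry]
  | true =>
    by_cases hm : m = 0
    · subst hm
      have h0 : pvBase5 0 = [] := by rw [pvBase5]; simp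
      rw [h0]; simp [pvCarry]; decide
    · rw [pvBase5, dif_neg hm]; simp only [pvCarry]
      have h5 : m % 5 ≤ 4 := by omega
      have hch : ∀ k : Nat, k ≤ 4 → Char.ofNat ((pvDChar k).toNat + 1) = pvDChar (k + 1) := by
        intro k hk; interval_cases k <;> decide
      rw [hch _ h5]; simp

lemma pvGetMid (done t : List Char) (c x : Char) :
    PySem.List.pyGetD (done ++ c :: t) (done.length : Int) x = c := by
  rw [PySem.List.pyGetD_natCast]
  rw [List.getD_eq_getElem?_getD, List.getElem?_append_right (le_refl _)]
  simp

lemma pvSetMid (done t : List Char) (c v : Char) :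
    PySem.List.pySetD (done ++ c :: t) (done.length : Int) v = done ++ v :: t := by
  rw [PySem.List.pySetD_natCast, List.set_append]
  simp

-- one loop iteration, digit not in the table
lemma pvStepNoTable (fuel : Nat) (done t : List Char) (c : Char) (j : Int)
    (hc : pvConvTable.contains c = false)
    (hij : (done.length : Int) < j) :
    pvFixLoop (fuel + 1) (done ++ c :: t) (done.length : Int) j
      = pvFixLoop fuel ((done ++ [c]) ++ t) ((done ++ [c]).length : Int) j := by
  rw [pvFixLoop, if_pos hij]
  simp only [pvGetMid, hc, Bool.false_eq_true, if_false]
  simp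

-- one loop iteration, digit in the table, a following digit exists (gets incremented)
lemma pvStepCarry (fuel : Nat) (done t : List Char) (c r : Char) (j : Int)
    (hc : pvConvTable.contains c = true)
    (hij : (done.length : Int) < j) :
    pvFixLoop (fuel + 1) (done ++ c :: r :: t) (done.length : Int) j
      = pvFixLoop fuel ((done ++ [(pvConvTable.get? c).getD c]) ++ (Char.ofNat (r.toNat + 1) :: t))
          ((done ++ [(pvConvTable.get? c).getD c]).length : Int) j := by
  rw [pvFixLoop, if_pos hij]
  simp only [pvGetMid, hc, if_true, pvSetMid]
  have hlist : done ++ ((pvConvTable.get? c).getD c) :: r :: t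
      = (done ++ [(pvConvTable.get? c).getD c]) ++ r :: t := by simp
  rw [hlist]
  have hicast : (done.length : Int) + 1
      = (((done ++ [(pvConvTable.get? c).getD c]).length : Nat) : Int) := by simp
  have hcond : (done.length : Int)
      < ((((done ++ [(pvConvTable.get? c).getD c]) ++ r :: t).length : Nat) : Int) - 1 := by
    simp; omega
  rw [if_pos hcond, hicast, pvGetMid, pvSetMid]

-- one loop iteration, digit in the table, at the end of the list (appends '1')
lemma pvStepAppend (fuel : Nat) (done : List Char) (c : Char) (j : Int)
    (hc : pvConvTable.contains c = true)
    (hij : (done.length : Int) < j) :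
    pvFixLoop (fuel + 1) (done ++ [c]) (done.length : Int) j
      = pvFixLoop fuel ((done ++ [(pvConvTable.get? c).getD c]) ++ ['1'])
          ((done ++ [(pvConvTable.get? c).getD c]).length : Int) (j + 1) := by
  have h1 : done ++ [c] = done ++ c :: ([] : List Char) := by simp
  rw [pvFixLoop, if_pos hij, h1]
  simp only [pvGetMid, hc, if_true, pvSetMid]
  have hcond : ¬ ((done.length : Int)
      < (((done ++ ((pvConvTable.get? c).getD c) :: ([] : List Char)).length : Nat) : Int) - 1) := by
    simp
  rw [if_neg hcond]
  have hicast : (done.length : Int) + 1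
      = (((done ++ [(pvConvTable.get? c).getD c]).length : Nat) : Int) := by simp
  rw [hicast]

-- one full iteration on a digit not in the table, folded with the rest of the run
lemma pvPlainStep (fuel q : Nat) (done : List Char) (c : Char)
    (hc : pvConvTable.contains c = false)
    (IH : ∀ (m : Nat) (e : Bool) (d : List Char),
      (pvBDig (m + (if e then 1 else 0))).length ≤ fuel →
      pvFixLoop fuel (d ++ pvCarry e (pvBase5 m)) (d.length : Int)
        ((d.length + (pvCarry e (pvBase5 m)).length : Nat) : Int)
        = d ++ pvBDig (m + (if e then 1 else 0)))
    (hf : (pvBDig q).length ≤ fuel) :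
    pvFixLoop (fuel + 1) (done ++ c :: pvBase5 q) (done.length : Int)
      ((done.length + (c :: pvBase5 q).length : Nat) : Int)
      = done ++ c :: pvBDig q := by
  have hij : (done.length : Int) < ((done.length + (c :: pvBase5 q).length : Nat) : Int) := by
    push_cast; simp only [List.length_cons]; omega
  rw [pvStepNoTable fuel done (pvBase5 q) c _ hc hij]
  have h2 := IH q false (done ++ [c]) (by simpa using hf)
  simp only [pvCarry] at h2
  have hj : ((done.length + (c :: pvBase5 q).length : Nat) : Int)
      = (((done ++ [c]).length + (pvBase5 q).length : Nat) : Int) :=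
    congrArg _ (by simp; omega)
  rw [hj, h2]
  simp

-- one full iteration on a digit in the table, folded with the rest of the run
lemma pvTableStep (fuel q : Nat) (done : List Char) (c : Char)
    (hc : pvConvTable.contains c = true)
    (IH : ∀ (m : Nat) (e : Bool) (d : List Char),
      (pvBDig (m + (if e then 1 else 0))).length ≤ fuel →
      pvFixLoop fuel (d ++ pvCarry e (pvBase5 m)) (d.length : Int)
        ((d.length + (pvCarry e (pvBase5 m)).length : Nat) : Int)
        = d ++ pvBDig (m + (if e then 1 else 0)))
    (hf : (pvBDig (q + 1)).length ≤ fuel) :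
    pvFixLoop (fuel + 1) (done ++ c :: pvBase5 q) (done.length : Int)
      ((done.length + (c :: pvBase5 q).length : Nat) : Int)
      = done ++ ((pvConvTable.get? c).getD c) :: pvBDig (q + 1) := by
  have hij : (done.length : Int) < ((done.length + (c :: pvBase5 q).length : Nat) : Int) := by
    push_cast; simp only [List.length_cons]; omega
  have h2 := IH q true (done ++ [(pvConvTable.get? c).getD c]) (by simpa using hf)
  by_cases hq : q = 0
  · subst hq
    have h0 : pvBase5 0 = [] := (pvBase5_nil_iff 0).2 rfl
    have hc1 : pvCarry true (pvBase5 0) = ['1'] := by rw [h0]; simp [pvCarry]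
    rw [hc1] at h2
    have h1 : done ++ c :: pvBase5 0 = done ++ [c] := by rw [h0]
    rw [h1, pvStepAppend fuel done c _ hc hij]
    have hjj : ((done.length + (c :: pvBase5 0).length : Nat) : Int) + 1
        = (((done ++ [(pvConvTable.get? c).getD c]).length
            + (['1'] : List Char).length : Nat) : Int) := by
      rw [h0]; push_cast; simp
    rw [hjj, h2]
    simp
  · have hcons : pvBase5 q = pvDChar (q % 5) :: pvBase5 (q / 5) := by
      rw [pvBase5, dif_neg hq]
    rw [hcons] at hij ⊢
    rw [pvStepCarry fuel done (pvBase5 (q / 5)) c (pvDChar (q % 5)) _ hc hij]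
    have hcar : (Char.ofNat ((pvDChar (q % 5)).toNat + 1) :: pvBase5 (q / 5))
        = pvCarry true (pvBase5 q) := by rw [hcons]; simp [pvCarry]
    have hjj : ((done.length + (c :: pvDChar (q % 5) :: pvBase5 (q / 5)).length : Nat) : Int)
        = (((done ++ [(pvConvTable.get? c).getD c]).length
            + (pvCarry true (pvBase5 q)).length : Nat) : Int) := by
      rw [hcons]; push_cast; simp [pvCarry]; omega
    rw [hcar, hjj, h2]
    simp

-- the main loop lemma: A's fixup loop, run on done ++ (carry-adjusted base-5 digits of m),
-- finishes as done ++ pvBDig (m + e)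
lemma pvFixLoop_eq : ∀ (fuel m : Nat) (e : Bool) (done : List Char),
    (pvBDig (m + (if e then 1 else 0))).length ≤ fuel →
    pvFixLoop fuel (done ++ pvCarry e (pvBase5 m)) (done.length : Int)
      ((done.length + (pvCarry e (pvBase5 m)).length : Nat) : Int)
      = done ++ pvBDig (m + (if e then 1 else 0)) := by
  intro fuel
  induction fuel with
  | zero =>
    intro m e done hf
    have h0 : pvBDig (m + (if e then 1 else 0)) = [] := by
      cases h : pvBDig (m + (if e then 1 else 0)) with
      | nil => rfl
      | cons a l => rw [h] at hf; simp at hf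
    have hme : m + (if e then 1 else 0) = 0 := (pvBDig_nil_iff _).1 h0
    have he : e = false := by cases e <;> simp_all
    subst he
    have hm : m = 0 := by simpa using hme
    subst hm
    rw [(pvBase5_nil_iff 0).2 rfl, h0]
    simp [pvCarry, pvFixLoop]
  | succ fuel ih =>
    intro m e done hf
    by_cases hme : m = 0 ∧ e = false
    · obtain ⟨hm, he⟩ := hme; subst hm; subst he
      rw [(pvBase5_nil_iff 0).2 rfl]
      have hb : pvBDig 0 = [] := (pvBDig_nil_iff 0).2 rfl
      simp only [pvCarry, List.append_nil, List.length_nil, Nat.add_zero]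
      rw [pvFixLoop, if_neg (by omega)]
      simp [hb]
    · rw [pvCarry_cons m e hme]
      have hm1 : ¬ (m + 1 = 0) := by omega
      have hmod : m % 5 ≤ 4 := by omega
      cases e with
      | false =>
        have hm : ¬ m = 0 := fun h => hme ⟨h, rfl⟩
        simp only [if_neg Bool.false_ne_true, Nat.add_zero] at hf ⊢
        by_cases h2 : m % 5 ≤ 2
        · have hRB : pvBDig m = pvDChar (m % 5) :: pvBDig (m / 5) := by
            rw [pvBDig, dif_neg hm, dif_pos h2]
          rw [hRB]
          exact pvPlainStep fuel (m / 5) done (pvDChar (m % 5))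
            (by interval_cases h : m % 5 <;> simp_all <;> decide) ih
            (by rw [hRB] at hf; simpa using hf)
        · have hRB : pvBDig m = (if m % 5 = 3 then '=' else '-') :: pvBDig (m / 5 + 1) := by
            rw [pvBDig, dif_neg hm, dif_neg h2]
          have hcv : (pvConvTable.get? (pvDChar (m % 5))).getD (pvDChar (m % 5))
              = (if m % 5 = 3 then '=' else '-') := by
            interval_cases h : m % 5 <;> simp_all <;> decide
          rw [hRB, ← hcv]
          exact pvTableStep fuel (m / 5) done (pvDChar (m % 5))
            (by interval_cases h : m % 5 <;> simp_all <;> decide) ih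
            (by rw [hRB] at hf; simpa using hf)
      | true =>
        simp only [if_true] at hf ⊢
        by_cases h2 : m % 5 ≤ 1
        · have e1 : (m + 1) % 5 = m % 5 + 1 := by omega
          have e2 : (m + 1) / 5 = m / 5 := by omega
          have hRB : pvBDig (m + 1) = pvDChar (m % 5 + 1) :: pvBDig (m / 5) := by
            rw [pvBDig, dif_neg hm1, dif_pos (by omega), e1, e2]
          rw [hRB]
          exact pvPlainStep fuel (m / 5) done (pvDChar (m % 5 + 1))
            (by interval_cases h : m % 5 <;> simp_all <;> decide) ih
            (by rw [hRB] at hf; simpa using hf)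
        · by_cases h4 : m % 5 = 4
          · have e1 : (m + 1) % 5 = 0 := by omega
            have e2 : (m + 1) / 5 = m / 5 + 1 := by omega
            have hRB : pvBDig (m + 1) = pvDChar 0 :: pvBDig (m / 5 + 1) := by
              rw [pvBDig, dif_neg hm1, dif_pos (by omega), e1, e2]
            have hcv : (pvConvTable.get? (pvDChar (m % 5 + 1))).getD (pvDChar (m % 5 + 1))
                = pvDChar 0 := by rw [h4]; decide
            rw [hRB, ← hcv]
            exact pvTableStep fuel (m / 5) done (pvDChar (m % 5 + 1))
              (by rw [h4]; decide) ih (by rw [hRB] at hf; simpa using hf)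
          · have e1 : (m + 1) % 5 = m % 5 + 1 := by omega
            have e2 : (m + 1) / 5 = m / 5 := by omega
            have hRB : pvBDig (m + 1)
                = (if (m + 1) % 5 = 3 then '=' else '-') :: pvBDig (m / 5 + 1) := by
              rw [pvBDig, dif_neg hm1, dif_neg (by omega), e2]
            have hcv : (pvConvTable.get? (pvDChar (m % 5 + 1))).getD (pvDChar (m % 5 + 1))
                = (if (m + 1) % 5 = 3 then '=' else '-') := by
              rw [e1]; interval_cases h : m % 5 <;> simp_all <;> decide
            rw [hRB, ← hcv]
            exact pvTableStep fuel (m / 5) done (pvDChar (m % 5 + 1))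
              (by interval_cases h : m % 5 <;> simp_all <;> decide) ih
              (by rw [hRB] at hf; simpa using hf)

theorem pv_main (num : Int) (h : 0 ≤ num) : base10_to_SNAFU num = base10_to_SNAFU_alt num := by
  lift num to Nat using h with m
  unfold base10_to_SNAFU base10_to_SNAFU_alt
  simp only [Int.natAbs_natCast]
  rw [pvToBase5_eq (m + 1) m [] (by omega), pvSnafuLoop_eq (m + 1) m [] (by omega)]
  simp only [List.append_nil, List.reverse_reverse, List.nil_append]
  have hmain := pvFixLoop_eq (2 * (pvBase5 m).length + 2) m false []
    (by have := (pvBDig_len m).1; simp only [Bool.false_eq_true, if_false, Nat.add_zero]; omega)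
  simp only [pvCarry, List.nil_append, List.length_nil, Nat.cast_zero, Nat.zero_add,
    Bool.false_eq_true, if_false, Nat.add_zero] at hmain
  rw [hmain]

-- ===== VERDICT (by name: the statement is the Claim_ definition above) =====
theorem base10_to_SNAFU_spec : Claim_equal_base10_to_SNAFU := by
  intro num _ hpre
  exact pv_main num hpre
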